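-- pv_equiv track=rewrite | github.com/opensensor/bionpu | src/bionpu/data/cpg_oracle.py | merge_streak_positions_to_islands
-- ===== SOURCE A (Python) =====
-- from typing import Final
--
-- CPG_DEFAULT_W: Final[int] = 200
--
-- def merge_streak_positions_to_islands(
--     positions: list[int],
--     w: int = CPG_DEFAULT_W,
-- ) -> list[tuple[int, int]]:
--     """Merge a sorted list of ON_STREAK window-start positions into
--     ``(island_start, island_end)`` half-open intervals.
--
--     For a contiguous run of window-start positions ``[a, a+1, ..., b]``,
--     the emitted island is ``(a, b + w)``: the first base of the first
--     window through the last base of the last window (exclusive end).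
--     """
--     if not positions:
--         return []
--     out: list[tuple[int, int]] = []
--     run_start = positions[0]
--     prev = positions[0]
--     for p in positions[1:]:
--         if p == prev + 1:
--             prev = p
--             continue
--         out.append((run_start, prev + w))
--         run_start = p
--         prev = p
--     out.append((run_start, prev + w))
--     return out
-- ===== SOURCE B (Python) =====
-- from itertools import groupby
--
-- CPG_DEFAULT_W = 200
--
-- def merge_streak_positions_to_islands(positions, w=CPG_DEFAULT_W):
--     """groupby(enumerate(positions)) keyed by p - i: each group is a maximal
--     consecutive run; emit (first, last + w)."""
--     out = []
--     for _, grp in groupby(enumerate(positions), key=lambda iv: iv[1] - iv[0]):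
--         g = list(grp)
--         out.append((g[0][1], g[-1][1] + w))
--     return out
-- ===== Notes on version B (the rewrite author's own statement) =====
-- stated objective: idiomatic
-- what changed: Replaces the manual run_start/prev boundary-tracking loop with itertools.groupby over enumerate keyed by position-minus-index, emitting (first, last + w) per maximal consecutive group.
import Mathlib
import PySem

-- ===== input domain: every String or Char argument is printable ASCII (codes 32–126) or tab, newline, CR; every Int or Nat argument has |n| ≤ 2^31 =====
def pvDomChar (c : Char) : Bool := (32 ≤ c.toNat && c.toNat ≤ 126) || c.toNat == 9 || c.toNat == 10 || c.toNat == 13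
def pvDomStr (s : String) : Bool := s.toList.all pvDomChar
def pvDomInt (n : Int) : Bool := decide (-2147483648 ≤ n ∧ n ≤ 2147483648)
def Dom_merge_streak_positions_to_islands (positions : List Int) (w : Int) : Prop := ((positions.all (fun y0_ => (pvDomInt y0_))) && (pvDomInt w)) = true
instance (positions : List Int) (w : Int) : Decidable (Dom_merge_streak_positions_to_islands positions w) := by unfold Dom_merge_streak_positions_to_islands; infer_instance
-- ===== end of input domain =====

-- B replaces A's manual run_start/prev boundary-tracking loop with a groupby-by-key
-- (position minus index) pass over the enumerated list; idiomatic, same O(n) cost.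


-- ===== PORT A =====
-- literal transliteration: fold over positions[1:] with state (out, run_start, prev)
def merge_streak_positions_to_islands (positions : List Int) (w : Int) : List (Int × Int) :=
  match positions with
  | [] => []
  | p0 :: rest =>
    let st := rest.foldl
      (fun (acc : List (Int × Int) × Int × Int) p =>
        if p = acc.2.2 + 1 then (acc.1, acc.2.1, p)
        else (acc.1 ++ [(acc.2.1, acc.2.2 + w)], p, p))
      ([], p0, p0)
    st.1 ++ [(st.2.1, st.2.2 + w)]

-- ===== PORT B =====
-- hand port of itertools.groupby with key iv.2 - iv.1 (position minus index)
def pvGroupRuns : List (Int × Int) → List (List (Int × Int))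
  | [] => []
  | [x] => [[x]]
  | x :: y :: xs =>
    if x.2 - x.1 = y.2 - y.1 then
      match pvGroupRuns (y :: xs) with
      | g :: gs => (x :: g) :: gs
      | [] => [[x]]  -- unreachable: pvGroupRuns of a nonempty list is nonempty
    else [x] :: pvGroupRuns (y :: xs)

-- (g[0][1], g[-1][1] + w) for a group g
def pvIslandOf (w : Int) (g : List (Int × Int)) : Int × Int :=
  match g with
  | [] => (0, 0)  -- unreachable: groups are nonempty
  | x :: t => (x.2, (t.getLast?.getD x).2 + w)

def merge_streak_positions_to_islands_alt (positions : List Int) (w : Int) : List (Int × Int) :=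
  (pvGroupRuns (PySem.List.enumerate positions)).map (pvIslandOf w)

-- ===== PRECONDITION & SPEC =====
def Spec_merge_streak_positions_to_islands (positions : List Int) (w : Int) (out : List (Int × Int)) : Prop := out = merge_streak_positions_to_islands_alt positions w
instance (positions : List Int) (w : Int) (out : List (Int × Int)) : Decidable (Spec_merge_streak_positions_to_islands positions w out) := by unfold Spec_merge_streak_positions_to_islands; infer_instance

-- ===== CLAIM (what is proved, stated in full; the proofs are below) =====
def Claim_equal_merge_streak_positions_to_islands : Prop := ∀ (positions : List Int) (w : Int), Dom_merge_streak_positions_to_islands positions w → Spec_merge_streak_positions_to_islands positions w (merge_streak_positions_to_islands positions w)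

-- ===== LEMMAS AND PROOFS =====

-- reference function: islands of a run started at rs whose last element so far is prev,
-- followed by the remaining positions l
def pvRef (w rs prev : Int) : List Int → List (Int × Int)
  | [] => [(rs, prev + w)]
  | p :: ps => if p = prev + 1 then pvRef w rs p ps else (rs, prev + w) :: pvRef w p p ps

-- the end of the current run, and the islands after it (pvRef decomposed)
def pvEndOf (w prev : Int) : List Int → Int
  | [] => prev + w
  | p :: ps => if p = prev + 1 then pvEndOf w p ps else prev + w

def pvRestOf (w prev : Int) : List Int → List (Int × Int)
  | [] => []
  | p :: ps => if p = prev + 1 then pvRestOf w p ps else pvRef w p p ps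

theorem pvRef_eq (w prev : Int) (l : List Int) (rs : Int) :
    pvRef w rs prev l = (rs, pvEndOf w prev l) :: pvRestOf w prev l := by
  induction l generalizing rs prev with
  | nil => rfl
  | cons p ps ih =>
    simp only [pvRef, pvEndOf, pvRestOf]
    split_ifs with h
    · exact ih p rs
    · rfl

theorem portA_eq_ref (w : Int) (l : List Int) (out : List (Int × Int)) (rs prev : Int) :
    (let st := l.foldl
      (fun (acc : List (Int × Int) × Int × Int) p =>
        if p = acc.2.2 + 1 then (acc.1, acc.2.1, p)
        else (acc.1 ++ [(acc.2.1, acc.2.2 + w)], p, p))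
      (out, rs, prev)
     st.1 ++ [(st.2.1, st.2.2 + w)]) = out ++ pvRef w rs prev l := by
  induction l generalizing out rs prev with
  | nil => rfl
  | cons p ps ih =>
    simp only [List.foldl_cons, pvRef]
    split_ifs with h
    · simpa [h] using ih out rs p
    · simpa [h, List.append_assoc] using ih (out ++ [(rs, prev + w)]) p p

theorem pvGroupRuns_cons (x : Int × Int) (xs : List (Int × Int)) :
    ∃ g gs, pvGroupRuns (x :: xs) = (x :: g) :: gs := by
  cases xs with
  | nil => exact ⟨[], [], rfl⟩
  | cons y ys =>
    simp only [pvGroupRuns]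
    split_ifs with h
    · obtain ⟨g, gs, hg⟩ := pvGroupRuns_cons y ys
      rw [hg]; exact ⟨y :: g, gs, rfl⟩
    · exact ⟨[], pvGroupRuns (y :: ys), rfl⟩

theorem portB_eq_ref (w : Int) (ps : List Int) (i p : Int) :
    (pvGroupRuns (PySem.List.enumerate (p :: ps) i)).map (pvIslandOf w) = pvRef w p p ps := by
  induction ps generalizing i p with
  | nil => simp [PySem.List.enumerate_cons, PySem.List.enumerate_nil, pvGroupRuns,
      pvIslandOf, pvRef]
  | cons q qs ih =>
    rw [PySem.List.enumerate_cons, PySem.List.enumerate_cons]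
    simp only [pvGroupRuns]
    by_cases h : q = p + 1
    · have hk : (p : Int) - i = q - (i + 1) := by omega
      rw [if_pos hk]
      obtain ⟨g, gs, hg⟩ := pvGroupRuns_cons (i + 1, q) (PySem.List.enumerate qs (i + 1 + 1))
      have hih := ih (i + 1) q
      rw [PySem.List.enumerate_cons] at hih
      rw [hg] at hih ⊢
      simp only [List.map_cons] at hih ⊢
      rw [pvRef_eq] at hih
      rw [pvRef_eq, show pvEndOf w p (q :: qs) = pvEndOf w q qs by simp [pvEndOf, h],
          show pvRestOf w p (q :: qs) = pvRestOf w q qs by simp [pvRestOf, h]]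
      obtain ⟨h1, h2⟩ := List.cons_eq_cons.mp hih
      rw [h2]
      have hL : ((i + 1, q) :: g).getLast?.getD ((i : Int), p) = g.getLast?.getD (i + 1, q) := by
        cases g <;> simp [List.getLast?_cons]
      have hsnd := congrArg Prod.snd h1
      simp only [pvIslandOf] at hsnd ⊢
      rw [hL, hsnd]
    · have hk : ¬ ((p : Int) - i = q - (i + 1)) := by omega
      rw [if_neg hk]
      rw [← PySem.List.enumerate_cons]
      simp only [List.map_cons, ih (i + 1) q]
      rw [show pvRef w p p (q :: qs) = (p, p + w) :: pvRef w q q qs by simp [pvRef, h]]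
      simp [pvIslandOf]

-- ===== VERDICT (by name: the statement is the Claim_ definition above) =====
theorem merge_streak_positions_to_islands_spec : Claim_equal_merge_streak_positions_to_islands := by
  intro positions w _
  unfold Spec_merge_streak_positions_to_islands merge_streak_positions_to_islands merge_streak_positions_to_islands_alt
  cases positions with
  | nil => simp [PySem.List.enumerate_nil, pvGroupRuns]
  | cons p0 rest =>
    simp only
    rw [portB_eq_ref w rest 0 p0]
    simpa using portA_eq_ref w rest [] p0 p0
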